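-- pv_equiv track=rewrite | github.com/jonasnic/codingame | puzzles/python3/mayan_calc.py | convert_base10_to_20
-- ===== SOURCE A (Python) =====
-- from typing import Dict, List
--
-- BASE: int = 20
--
-- def convert_base10_to_20(number: int) -> List[int]:
--     num_list: List[int] = []
--     # avoid division by 0
--     if number == 0:
--         num_list.append(0)
--         return num_list
--
--     while number != 0:
--         num_list.append(number % BASE)  # remainder
--         number //= BASE
--
--     return num_list[::-1]
-- ===== SOURCE B (Python) =====
-- from typing import List
--
-- BASE: int = 20
--
-- def convert_base10_to_20(number: int) -> List[int]:
--     # recursion over the quotient: most-significant digit first, no reversal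
--     if number < BASE:
--         return [number]
--     return convert_base10_to_20(number // BASE) + [number % BASE]
-- ===== Notes on version B (the rewrite author's own statement) =====
-- stated objective: simpler
-- what changed: Replaced the while-loop that appends least-significant digits and then reverses with a slice by direct recursion on the quotient producing digits most-significant first, with no accumulator list and no reversal.
-- outside the precondition, e.g. on convert_base10_to_20(-1): A does not finish within the time limit, B returns [-1]
import Mathlib
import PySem

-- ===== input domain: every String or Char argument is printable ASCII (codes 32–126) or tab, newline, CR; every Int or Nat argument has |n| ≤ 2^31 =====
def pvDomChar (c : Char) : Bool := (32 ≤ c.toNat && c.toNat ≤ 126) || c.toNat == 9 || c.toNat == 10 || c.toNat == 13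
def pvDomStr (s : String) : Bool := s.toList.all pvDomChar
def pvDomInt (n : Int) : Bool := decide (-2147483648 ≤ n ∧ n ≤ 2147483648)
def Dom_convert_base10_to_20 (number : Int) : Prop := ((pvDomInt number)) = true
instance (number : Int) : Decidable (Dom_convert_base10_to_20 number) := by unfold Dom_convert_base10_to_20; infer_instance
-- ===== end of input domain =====

-- B replaces A's append-then-reverse while-loop by direct recursion on the quotient (simpler; no reversal).

-- ===== PORT A =====
-- A's while-loop, with fuel making it total in Lean (the fuel passed below suffices for every
-- number ≥ 0, i.e. everywhere inside Pre_; on negative inputs the Python loop never terminates).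
def convert_base10_to_20_loop (fuel : Nat) (number : Int) (numList : List Int) : List Int :=
  match fuel with
  | 0 => numList
  | fuel + 1 =>
    if number = 0 then numList
    else convert_base10_to_20_loop fuel (PySem.Int.floordiv number 20)
           (numList ++ [PySem.Int.mod number 20])

def convert_base10_to_20 (number : Int) : List Int :=
  if number = 0 then [0]
  else (PySem.List.slice? (convert_base10_to_20_loop (number.natAbs + 1) number []) none none (-1)).getD []

-- ===== PORT B =====
def convert_base10_to_20_alt (number : Int) : List Int :=
  if number < 20 then [number]
  else convert_base10_to_20_alt (PySem.Int.floordiv number 20) ++ [PySem.Int.mod number 20]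
termination_by number.natAbs
decreasing_by
  rw [PySem.Int.floordiv_eq_ediv_of_pos (by omega)]
  omega

-- ===== PRECONDITION & SPEC =====
-- Pre_ excludes negative inputs: there A's while-loop never terminates (number //= 20 stalls at -1).
def Pre_convert_base10_to_20 (number : Int) : Prop := 0 ≤ number
instance (number : Int) : Decidable (Pre_convert_base10_to_20 number) := by unfold Pre_convert_base10_to_20; infer_instance
def pvWitness_convert_base10_to_20 : Int := (42)
def Spec_convert_base10_to_20 (number : Int) (out : List Int) : Prop := out = convert_base10_to_20_alt number
instance (number : Int) (out : List Int) : Decidable (Spec_convert_base10_to_20 number out) := by unfold Spec_convert_base10_to_20; infer_instance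

-- ===== CLAIM (what is proved, stated in full; the proofs are below) =====
def Claim_equal_convert_base10_to_20 : Prop := ∀ (number : Int), Dom_convert_base10_to_20 number → Pre_convert_base10_to_20 number → Spec_convert_base10_to_20 number (convert_base10_to_20 number)

-- ===== LEMMAS AND PROOFS =====

-- With enough fuel, A's loop appends exactly the reverse of B's digit list.
theorem loop_eq_alt_reverse (fuel : Nat) : ∀ (n : Int) (acc : List Int),
    0 < n → n.toNat < 20 ^ fuel →
    convert_base10_to_20_loop fuel n acc = acc ++ (convert_base10_to_20_alt n).reverse := by
  induction fuel with
  | zero => intro n acc hn hlt; simp at hlt; omega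
  | succ f ih =>
    intro n acc hn hlt
    have hfd : PySem.Int.floordiv n 20 = n / 20 := PySem.Int.floordiv_eq_ediv_of_pos (by omega)
    rw [convert_base10_to_20_loop]
    rw [if_neg (by omega)]
    by_cases h20 : n < 20
    · -- quotient is 0: loop stops next step; B returns [n]; n % 20 = n
      have hq : PySem.Int.floordiv n 20 = 0 := by rw [hfd]; omega
      have hm : PySem.Int.mod n 20 = n := by
        rw [PySem.Int.mod_eq_emod_of_pos (by omega)]; omega
      rw [hq, hm, convert_base10_to_20_alt, if_pos h20]
      cases f <;> simp [convert_base10_to_20_loop]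
    · -- recurse on the quotient
      have hq : 0 < PySem.Int.floordiv n 20 := by rw [hfd]; omega
      have hqlt : (PySem.Int.floordiv n 20).toNat < 20 ^ f := by
        rw [hfd]
        have : (n / 20).toNat = n.toNat / 20 := by omega
        rw [this]
        have h20f : n.toNat < 20 * 20 ^ f := by
          calc n.toNat < 20 ^ (f + 1) := hlt
          _ = 20 * 20 ^ f := by ring
        omega
      rw [ih _ _ hq hqlt]
      conv_rhs => rw [convert_base10_to_20_alt, if_neg h20]
      simp

theorem convert_base10_to_20_spec' (number : Int) (h : 0 ≤ number) :
    convert_base10_to_20 number = convert_base10_to_20_alt number := by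
  rw [convert_base10_to_20]
  by_cases h0 : number = 0
  · subst h0; rw [if_pos rfl, convert_base10_to_20_alt]; norm_num
  · rw [if_neg h0]
    have hfuel : number.toNat < 20 ^ (number.natAbs + 1) := by
      have h1 : number.natAbs < 20 ^ number.natAbs := Nat.lt_pow_self (by omega)
      have h2 : (20:Nat) ^ number.natAbs ≤ 20 ^ (number.natAbs + 1) :=
        Nat.pow_le_pow_right (by omega) (by omega)
      omega
    rw [loop_eq_alt_reverse _ _ _ (by omega) hfuel]
    rw [PySem.List.slice?_none_none_neg_one]
    simp

-- ===== VERDICT (by name: the statement is the Claim_ definition above) =====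
theorem convert_base10_to_20_spec : Claim_equal_convert_base10_to_20 := by
  intro number _ hpre
  exact convert_base10_to_20_spec' number hpre
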